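-- pv_equiv track=rewrite | github.com/Fuyuki-Kuro/Connecta-App | app/routes/views_new.py | menu_active
-- ===== SOURCE A (Python) =====
-- def menu_active(user_type: str) -> dict:
--     base = {
--         "dashboard": True,
--         "projetos": True,
--         "contrato": True,
--         "tickets": True,
--         # default false for others
--         "calendar": False,
--         "equipe": False,
--         "pagamentos": False,
--     }
--     if user_type == "Admin":
--         base.update({k: True for k in base})
--     elif user_type == "funcionario":
--         base.update({"calendar": True, "pagamentos": True})
--     # clientes: keep only defaults
--     return base
-- ===== SOURCE B (Python) =====
-- _MENUS = {
--     "Admin": {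
--         "dashboard": True, "projetos": True, "contrato": True, "tickets": True,
--         "calendar": True, "equipe": True, "pagamentos": True,
--     },
--     "funcionario": {
--         "dashboard": True, "projetos": True, "contrato": True, "tickets": True,
--         "calendar": True, "equipe": False, "pagamentos": True,
--     },
-- }
--
-- _DEFAULT = {
--     "dashboard": True, "projetos": True, "contrato": True, "tickets": True,
--     "calendar": False, "equipe": False, "pagamentos": False,
-- }
--
--
-- def menu_active(user_type: str) -> dict:
--     return dict(_MENUS.get(user_type, _DEFAULT))
-- ===== Notes on version B (the rewrite author's own statement) =====
-- stated objective: simpler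
-- what changed: Replaces the base-dict-plus-conditional-update construction with a single lookup in a precomputed table of complete per-role menus, returning a fresh copy.
import Mathlib
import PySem

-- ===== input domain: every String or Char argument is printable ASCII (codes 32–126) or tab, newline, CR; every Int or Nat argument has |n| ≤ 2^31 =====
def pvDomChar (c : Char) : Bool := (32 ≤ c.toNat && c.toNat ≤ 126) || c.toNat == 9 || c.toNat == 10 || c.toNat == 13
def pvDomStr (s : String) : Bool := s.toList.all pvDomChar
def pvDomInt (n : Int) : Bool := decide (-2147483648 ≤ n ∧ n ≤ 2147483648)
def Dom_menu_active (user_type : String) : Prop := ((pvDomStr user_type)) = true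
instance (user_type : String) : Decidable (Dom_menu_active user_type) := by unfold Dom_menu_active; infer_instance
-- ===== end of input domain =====

-- B replaces A's base-dict-plus-conditional-update with a lookup of a complete precomputed per-role menu (objective: simpler).

-- ===== PORT A =====
def menu_active (user_type : String) : List (String × Bool) :=
  let base : PySem.Dict String Bool := PySem.Dict.ofList
    [("dashboard", true), ("projetos", true), ("contrato", true), ("tickets", true),
     ("calendar", false), ("equipe", false), ("pagamentos", false)]
  let base :=
    if user_type == "Admin" then
      -- base.update({k: True for k in base})
      base.keys.foldl (fun d k => d.insert k true) base
    else if user_type == "funcionario" then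
      (base.insert "calendar" true).insert "pagamentos" true
    else base
  base.items

-- ===== PORT B =====
def pvDefaultMenu : PySem.Dict String Bool := PySem.Dict.ofList
  [("dashboard", true), ("projetos", true), ("contrato", true), ("tickets", true),
   ("calendar", false), ("equipe", false), ("pagamentos", false)]

def pvMenus : PySem.Dict String (PySem.Dict String Bool) := PySem.Dict.ofList
  [("Admin", PySem.Dict.ofList
      [("dashboard", true), ("projetos", true), ("contrato", true), ("tickets", true),
       ("calendar", true), ("equipe", true), ("pagamentos", true)]),
   ("funcionario", PySem.Dict.ofList
      [("dashboard", true), ("projetos", true), ("contrato", true), ("tickets", true),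
       ("calendar", true), ("equipe", false), ("pagamentos", true)])]

def menu_active_alt (user_type : String) : List (String × Bool) :=
  (pvMenus.getD user_type pvDefaultMenu).items

-- ===== PRECONDITION & SPEC =====
def Spec_menu_active (user_type : String) (out : List (String × Bool)) : Prop := out = menu_active_alt user_type
instance (user_type : String) (out : List (String × Bool)) : Decidable (Spec_menu_active user_type out) := by unfold Spec_menu_active; infer_instance

-- ===== CLAIM (what is proved, stated in full; the proofs are below) =====
def Claim_equal_menu_active : Prop := ∀ (user_type : String), Dom_menu_active user_type → Spec_menu_active user_type (menu_active user_type)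

-- ===== LEMMAS AND PROOFS =====

-- ===== VERDICT (by name: the statement is the Claim_ definition above) =====
theorem menu_active_spec : Claim_equal_menu_active := by
  intro u _
  unfold Spec_menu_active menu_active menu_active_alt
  by_cases h1 : u = "Admin"
  · subst h1; decide
  · by_cases h2 : u = "funcionario"
    · subst h2; decide
    · have ha : ("Admin" == u) = false := by simp [Ne.symm h1]
      have hf : ("funcionario" == u) = false := by simp [Ne.symm h2]
      simp only [beq_iff_eq, if_neg h1, if_neg h2]
      simp [pvMenus, pvDefaultMenu, PySem.Dict.getD, PySem.Dict.get?, PySem.Dict.ofList,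
        PySem.Dict.update, PySem.Dict.insert, PySem.Dict.empty,
        List.find?, ha, hf]
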